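-- pv_equiv track=rewrite | github.com/GekkoMaster2221/GekkoFinder | GekkoFinder.py | estimate_network_location
-- ===== SOURCE A (Python) =====
-- def estimate_network_location(ssid):
--     """
--     Estimate network location based on SSID patterns.
--     Returns a tuple (country, city) or ("Unknown", "Unknown")
--     """
--     ssid_lower = ssid.lower()
--
--     # Common patterns for different locations
--     if any(x in ssid_lower for x in ["starbucks", "cafe", "coffee"]):
--         return ("USA", "Unknown City")
--     elif any(x in ssid_lower for x in ["airport", "gate", "terminal"]):
--         return ("Unknown", "Airport")
--     elif any(x in ssid_lower for x in ["hotel", "marriott", "hilton"]):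
--         return ("Unknown", "Hotel")
--     elif any(x in ssid_lower for x in ["home", "house", "family"]):
--         return ("Local", "Home")
--     elif any(x in ssid_lower for x in ["work", "office", "corp", "company"]):
--         return ("Unknown", "Office")
--     elif any(x in ssid_lower for x in ["library", "public"]):
--         return ("Unknown", "Public Library")
--     else:
--         return ("Unknown", "Unknown")
-- ===== SOURCE B (Python) =====
-- KEYWORDS = [
--     ("starbucks", 0), ("cafe", 0), ("coffee", 0),
--     ("airport", 1), ("gate", 1), ("terminal", 1),
--     ("hotel", 2), ("marriott", 2), ("hilton", 2),
--     ("home", 3), ("house", 3), ("family", 3),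
--     ("work", 4), ("office", 4), ("corp", 4), ("company", 4),
--     ("library", 5), ("public", 5),
-- ]
--
-- RESULTS = [
--     ("USA", "Unknown City"),
--     ("Unknown", "Airport"),
--     ("Unknown", "Hotel"),
--     ("Local", "Home"),
--     ("Unknown", "Office"),
--     ("Unknown", "Public Library"),
--     ("Unknown", "Unknown"),
-- ]
--
-- def estimate_network_location(ssid):
--     s = ssid.lower()
--     # single pass over a flat keyword list, keeping the minimum (best) priority
--     best = 6
--     for k, p in KEYWORDS:
--         if k in s and p < best:
--             best = p
--     return RESULTS[best]
-- ===== Notes on version B (the rewrite author's own statement) =====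
-- stated objective: alternative
-- what changed: Instead of a short-circuiting if/elif chain over keyword groups, B makes one pass over a flat (keyword, priority) list keeping the minimum matching priority in an accumulator and indexes a results table with it.
import Mathlib
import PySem

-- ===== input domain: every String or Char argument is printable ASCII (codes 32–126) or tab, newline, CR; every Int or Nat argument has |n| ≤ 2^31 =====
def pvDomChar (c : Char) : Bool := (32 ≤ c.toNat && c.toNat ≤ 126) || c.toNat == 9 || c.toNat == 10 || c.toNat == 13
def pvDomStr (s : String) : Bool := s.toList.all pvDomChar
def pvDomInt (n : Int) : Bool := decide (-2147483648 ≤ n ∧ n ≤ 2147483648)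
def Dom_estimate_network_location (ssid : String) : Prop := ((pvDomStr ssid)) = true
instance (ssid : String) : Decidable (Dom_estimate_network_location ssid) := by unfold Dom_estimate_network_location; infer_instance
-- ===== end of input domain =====

-- B replaces the short-circuiting if/elif chain by one pass over a flat (keyword, priority) list keeping the minimum matching priority, then indexes a results table (alternative decomposition; same cost).


-- ===== PORT A =====
def estimate_network_location (ssid : String) : String × String :=
  let ssid_lower := PySem.Str.lower ssid
  if ["starbucks", "cafe", "coffee"].any (fun x => PySem.Str.isIn x ssid_lower) then
    ("USA", "Unknown City")
  else if ["airport", "gate", "terminal"].any (fun x => PySem.Str.isIn x ssid_lower) then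
    ("Unknown", "Airport")
  else if ["hotel", "marriott", "hilton"].any (fun x => PySem.Str.isIn x ssid_lower) then
    ("Unknown", "Hotel")
  else if ["home", "house", "family"].any (fun x => PySem.Str.isIn x ssid_lower) then
    ("Local", "Home")
  else if ["work", "office", "corp", "company"].any (fun x => PySem.Str.isIn x ssid_lower) then
    ("Unknown", "Office")
  else if ["library", "public"].any (fun x => PySem.Str.isIn x ssid_lower) then
    ("Unknown", "Public Library")
  else
    ("Unknown", "Unknown")

-- ===== PORT B =====
-- B: one pass over a flat keyword list, accumulating the minimum matching priority; result looked up in a table.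
def pvKeywords : List (String × Nat) :=
  [ ("starbucks", 0), ("cafe", 0), ("coffee", 0),
    ("airport", 1), ("gate", 1), ("terminal", 1),
    ("hotel", 2), ("marriott", 2), ("hilton", 2),
    ("home", 3), ("house", 3), ("family", 3),
    ("work", 4), ("office", 4), ("corp", 4), ("company", 4),
    ("library", 5), ("public", 5) ]

def pvResults : List (String × String) :=
  [ ("USA", "Unknown City"), ("Unknown", "Airport"), ("Unknown", "Hotel"),
    ("Local", "Home"), ("Unknown", "Office"), ("Unknown", "Public Library"),
    ("Unknown", "Unknown") ]

def estimate_network_location_alt (ssid : String) : String × String :=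
  let s := PySem.Str.lower ssid
  let best := pvKeywords.foldl
    (fun best kp => if PySem.Str.isIn kp.1 s ∧ kp.2 < best then kp.2 else best) 6
  -- best ≤ 6 always, so the index is in range and getD is exact for Python's RESULTS[best]
  pvResults.getD best ("Unknown", "Unknown")

-- ===== PRECONDITION & SPEC =====
def Spec_estimate_network_location (ssid : String) (out : String × String) : Prop := out = estimate_network_location_alt ssid
instance (ssid : String) (out : String × String) : Decidable (Spec_estimate_network_location ssid out) := by unfold Spec_estimate_network_location; infer_instance

-- ===== CLAIM (what is proved, stated in full; the proofs are below) =====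
def Claim_equal_estimate_network_location : Prop := ∀ (ssid : String), Dom_estimate_network_location ssid → Spec_estimate_network_location ssid (estimate_network_location ssid)

-- ===== LEMMAS AND PROOFS =====

def pvStep (g : Bool) (p acc : Nat) : Nat := if g = true ∧ p < acc then p else acc

-- folding B's accumulator over one constant-priority keyword group is a single pvStep
theorem pv_fold_group (s : String) (ks : List String) (p : Nat) (acc : Nat) :
    List.foldl (fun best kp => if PySem.Str.isIn kp.1 s ∧ kp.2 < best then kp.2 else best)
      acc (ks.map (fun k => (k, p)))
    = pvStep (ks.any (fun x => PySem.Str.isIn x s)) p acc := by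
  induction ks generalizing acc with
  | nil => simp [pvStep]
  | cons k ks ih =>
    simp only [List.map, List.foldl, List.any_cons, ih, pvStep]
    by_cases h : PySem.Chars.isIn k.toList s.toList = true <;> by_cases hp : p < acc <;>
      simp [PySem.Str.isIn, h, hp]

-- the table lookup of the chained minimum equals A's if/elif chain (64 boolean cases)
theorem pv_main (g0 g1 g2 g3 g4 g5 : Bool) :
    (if g0 then ("USA", "Unknown City")
     else if g1 then ("Unknown", "Airport")
     else if g2 then ("Unknown", "Hotel")
     else if g3 then ("Local", "Home")
     else if g4 then ("Unknown", "Office")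
     else if g5 then ("Unknown", "Public Library")
     else (("Unknown", "Unknown") : String × String))
    = pvResults.getD (pvStep g5 5 (pvStep g4 4 (pvStep g3 3 (pvStep g2 2 (pvStep g1 1 (pvStep g0 0 6)))))) ("Unknown", "Unknown") := by
  cases g0 <;> cases g1 <;> cases g2 <;> cases g3 <;> cases g4 <;> cases g5 <;> decide

theorem pv_keywords_grouped : pvKeywords =
    (["starbucks", "cafe", "coffee"].map (fun k => (k, 0)))
    ++ (["airport", "gate", "terminal"].map (fun k => (k, 1)))
    ++ (["hotel", "marriott", "hilton"].map (fun k => (k, 2)))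
    ++ (["home", "house", "family"].map (fun k => (k, 3)))
    ++ (["work", "office", "corp", "company"].map (fun k => (k, 4)))
    ++ (["library", "public"].map (fun k => (k, 5))) := rfl

-- ===== VERDICT (by name: the statement is the Claim_ definition above) =====
theorem estimate_network_location_spec : Claim_equal_estimate_network_location := by
  intro ssid _
  show estimate_network_location ssid = estimate_network_location_alt ssid
  unfold estimate_network_location estimate_network_location_alt
  simp only [pv_keywords_grouped, List.foldl_append, pv_fold_group]
  exact pv_main _ _ _ _ _ _
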